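-- pv_equiv track=rewrite | github.com/kshivam26/dns-cache-poisoning | detect_poison2.py | parse
-- ===== SOURCE A (Python) =====
-- def parse(s):
--     index = -1
--     index2 =-1
--     for i in range(0,len(s)):
--         if s[i] == '.' and i!=len(s)-2:
--             index2 = index
--             index=i
--     return index2
-- ===== SOURCE B (Python) =====
-- def parse(s):
--     count = 0
--     for i in range(len(s) - 1, -1, -1):
--         if s[i] == '.' and i != len(s) - 2:
--             count += 1
--             if count == 2:
--                 return i
--     return -1
-- ===== Notes on version B (the rewrite author's own statement) =====
-- stated objective: alternative
-- what changed: Replaces the full forward left-to-right scan that shifts a pair of index registers with a reverse scan that counts qualifying dots and returns as soon as the second one is found (early exit).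
import Mathlib
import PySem

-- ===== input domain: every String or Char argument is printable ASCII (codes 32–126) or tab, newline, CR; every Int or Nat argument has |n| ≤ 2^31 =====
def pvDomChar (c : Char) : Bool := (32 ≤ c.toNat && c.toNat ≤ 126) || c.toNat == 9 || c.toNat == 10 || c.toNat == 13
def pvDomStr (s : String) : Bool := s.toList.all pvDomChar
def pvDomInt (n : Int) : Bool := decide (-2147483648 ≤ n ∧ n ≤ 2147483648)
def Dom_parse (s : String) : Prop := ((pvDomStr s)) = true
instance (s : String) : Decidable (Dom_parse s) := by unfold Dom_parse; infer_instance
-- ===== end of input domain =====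

-- B replaces A's full forward scan (shifting two index registers) by a reverse scan that
-- counts qualifying dots and returns at the second one (early exit); same values everywhere.

-- ===== PORT A =====
-- forward loop over range(0, len(s)) carrying the pair (index, index2)
def parse (s : String) : Int :=
  let cs := s.toList
  let n : Int := PySem.Str.len s
  let st := (PySem.List.pyRange 0 n 1).foldl
    (fun (p : Int × Int) i =>
      if PySem.List.pyGet? cs i = some '.' ∧ i ≠ n - 2 then (i, p.1) else p)
    (-1, -1)
  st.2

-- ===== PORT B =====
-- reverse loop: fuel k means the current index is k-1; stops when count reaches 2
def parseAltGo (cs : List Char) (n : Int) (count : Nat) : Nat → Int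
  | 0 => -1
  | k + 1 =>
    if PySem.List.pyGet? cs (k : Int) = some '.' ∧ (k : Int) ≠ n - 2 then
      (if count + 1 = 2 then (k : Int) else parseAltGo cs n (count + 1) k)
    else parseAltGo cs n count k

def parse_alt (s : String) : Int :=
  let cs := s.toList
  parseAltGo cs (PySem.Str.len s) 0 cs.length

-- ===== PRECONDITION & SPEC =====
def Spec_parse (s : String) (out : Int) : Prop := out = parse_alt s
instance (s : String) (out : Int) : Decidable (Spec_parse s out) := by unfold Spec_parse; infer_instance

-- ===== CLAIM (what is proved, stated in full; the proofs are below) =====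
def Claim_equal_parse : Prop := ∀ (s : String), Dom_parse s → Spec_parse s (parse s)

-- ===== LEMMAS AND PROOFS =====

-- A's fold over the first k indices
def parseFoldA (cs : List Char) (n : Int) (k : Nat) : Int × Int :=
  (PySem.List.pyRange 0 (k : Int) 1).foldl
    (fun (p : Int × Int) i =>
      if PySem.List.pyGet? cs i = some '.' ∧ i ≠ n - 2 then (i, p.1) else p)
    (-1, -1)

lemma parse_key (cs : List Char) (n : Int) : ∀ k : Nat,
    parseAltGo cs n 1 k = (parseFoldA cs n k).1 ∧
    parseAltGo cs n 0 k = (parseFoldA cs n k).2 := by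
  intro k
  induction k with
  | zero => simp [parseAltGo, parseFoldA, PySem.List.pyRange_one_eq_nil]
  | succ k ih =>
    have hsplit : PySem.List.pyRange 0 ((k : Int) + 1) 1
        = PySem.List.pyRange 0 (k : Int) 1 ++ [(k : Int)] :=
      PySem.List.pyRange_one_succ_right (by positivity)
    have hF : parseFoldA cs n (k + 1)
        = (if PySem.List.pyGet? cs (k : Int) = some '.' ∧ (k : Int) ≠ n - 2
           then ((k : Int), (parseFoldA cs n k).1) else parseFoldA cs n k) := by
      unfold parseFoldA
      rw [show (((k + 1 : Nat) : Int)) = (k : Int) + 1 by push_cast; ring, hsplit,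
        List.foldl_append]
      simp
    obtain ⟨ih1, ih2⟩ := ih
    by_cases h : cs[k]? = some '.' ∧ ¬(k : Int) = n - 2
    · constructor
      · simp [parseAltGo, h, hF]
      · simp [parseAltGo, h, hF, ih1]
    · constructor
      · simp [parseAltGo, h, hF, ih1]
      · simp [parseAltGo, h, hF, ih2]

-- ===== VERDICT (by name: the statement is the Claim_ definition above) =====
theorem parse_spec : Claim_equal_parse := by
  intro s _
  unfold Spec_parse parse parse_alt
  have h := (parse_key s.toList (PySem.Str.len s) s.toList.length).2
  simp only [parseFoldA] at h
  simp only [PySem.Str.len_eq]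
  exact (h.symm)
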